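-- pv_equiv track=rewrite | github.com/flowerpower13/utils | _string_utils.py | _gen_context_indexes
-- ===== SOURCE A (Python) =====
-- def _gen_context_indexes(context_bag, list_tokens):
--     # Initialize an empty list to store the context indexes for each word.
--     context_indexes = list()
--
--     # Loop over all the words in the context bag.
--     for word in context_bag:
--         # Initialize an empty set to store the indexes of the current word and its neighbors.
--         word_indexes = set()
--
--         # Loop over all the tokens in the list of tokens.
--         for i, token in enumerate(list_tokens):
--             # If the current token matches the current word, add its index and the index of its left neighbor to the set.
--             if token == word:
--                 word_indexes.add(i)
--                 word_indexes.add(i-1)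
--
--         # If any indexes were found for the current word, sort them and add them to the list of context indexes.
--         if len(word_indexes) > 0:
--             sorted_context = list(word_indexes)
--             sorted_context.sort()
--             context_indexes.append(sorted_context)
--
--     # Return the list of context indexes for all words in the context bag.
--     return context_indexes
-- ===== SOURCE B (Python) =====
-- def _gen_context_indexes(context_bag, list_tokens):
--     # Index every token's occurrence positions once.
--     positions = {}
--     for i, token in enumerate(list_tokens):
--         positions.setdefault(token, []).append(i)
--
--     context_indexes = []
--     for word in context_bag:
--         # Occurrence indexes are already ascending; emit i-1, i pairs,
--         # skipping i-1 when it was just emitted (duplicates can only arise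
--         # between consecutive occurrences).
--         merged = []
--         for i in positions.get(word, []):
--             if merged and merged[-1] == i - 1:
--                 merged.append(i)
--             else:
--                 merged.append(i - 1)
--                 merged.append(i)
--         if merged:
--             context_indexes.append(merged)
--     return context_indexes
-- ===== Notes on version B (the rewrite author's own statement) =====
-- stated objective: faster
-- what changed: B builds a token->occurrence-index dict in one pass over the tokens and, per bag word, emits the (i-1,i) pairs of its already-ascending occurrence list in a single merge pass, replacing A's per-word full scan plus set-and-sort.
import Mathlib
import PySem

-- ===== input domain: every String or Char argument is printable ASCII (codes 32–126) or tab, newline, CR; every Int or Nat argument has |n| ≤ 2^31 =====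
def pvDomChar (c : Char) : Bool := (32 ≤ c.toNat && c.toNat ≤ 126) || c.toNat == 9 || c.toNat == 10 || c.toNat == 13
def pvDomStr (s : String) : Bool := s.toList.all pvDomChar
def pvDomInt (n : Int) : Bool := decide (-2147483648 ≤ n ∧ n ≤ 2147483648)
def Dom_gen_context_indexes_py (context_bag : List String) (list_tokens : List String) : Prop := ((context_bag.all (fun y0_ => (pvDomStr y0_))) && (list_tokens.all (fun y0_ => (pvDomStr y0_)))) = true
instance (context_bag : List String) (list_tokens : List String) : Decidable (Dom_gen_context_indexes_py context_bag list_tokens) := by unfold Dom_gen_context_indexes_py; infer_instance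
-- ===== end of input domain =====

-- B replaces A's per-bag-word scan over all tokens (set + sort) by a one-pass
-- token->occurrence-indexes dict and a linear merge of the ascending (i-1, i) pairs.

-- ===== PORT A =====
def gen_context_indexes_py (context_bag : List String) (list_tokens : List String) : List (List Int) :=
  context_bag.foldl (fun context_indexes word =>
    let word_indexes : PySem.Set Int :=
      (PySem.List.enumerate list_tokens).foldl
        (fun s p => if p.2 == word then PySem.Set.add (PySem.Set.add s p.1) (p.1 - 1) else s)
        PySem.Set.empty
    if PySem.Set.len word_indexes > 0 then
      context_indexes ++ [PySem.List.sorted word_indexes (fun x => x) false]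
    else context_indexes) []

-- ===== PORT B =====
-- one merge step of Source B's inner loop; `merged and merged[-1] == i - 1` is
-- exactly "getLast? = some (i-1)" (merged[-1] on the checked-nonempty list is its last element)
def pvMergeStep (m : List Int) (i : Int) : List Int :=
  match m.getLast? with
  | some x => if x == i - 1 then m ++ [i] else m ++ [i - 1, i]
  | none => m ++ [i - 1, i]

def gen_context_indexes_py_alt (context_bag : List String) (list_tokens : List String) : List (List Int) :=
  let positions : PySem.Dict String (List Int) :=
    (PySem.List.enumerate list_tokens).foldl
      (fun d p => d.modify p.2 [] (fun l => l ++ [p.1])) PySem.Dict.empty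
  context_bag.foldl (fun context_indexes word =>
    let merged : List Int := (positions.getD word []).foldl pvMergeStep []
    if merged.isEmpty then context_indexes else context_indexes ++ [merged]) []

-- ===== PRECONDITION & SPEC =====
def Spec_gen_context_indexes_py (context_bag : List String) (list_tokens : List String) (out : List (List Int)) : Prop := out = gen_context_indexes_py_alt context_bag list_tokens
instance (context_bag : List String) (list_tokens : List String) (out : List (List Int)) : Decidable (Spec_gen_context_indexes_py context_bag list_tokens out) := by unfold Spec_gen_context_indexes_py; infer_instance

-- ===== CLAIM (what is proved, stated in full; the proofs are below) =====
def Claim_equal_gen_context_indexes_py : Prop := ∀ (context_bag : List String) (list_tokens : List String), Dom_gen_context_indexes_py context_bag list_tokens → Spec_gen_context_indexes_py context_bag list_tokens (gen_context_indexes_py context_bag list_tokens)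

-- ===== LEMMAS AND PROOFS =====

-- A's inner set accumulation step
def pvSetStep (word : String) (s : PySem.Set Int) (p : Int × String) : PySem.Set Int :=
  if p.2 == word then PySem.Set.add (PySem.Set.add s p.1) (p.1 - 1) else s

-- occurrence indexes of `word` in `list_tokens`, ascending
def pvOcc (list_tokens : List String) (word : String) : List Int :=
  ((PySem.List.enumerate list_tokens).filter (fun p => p.2 == word)).map (fun p => p.1)

theorem pvSet_mem (word : String) (l : List (Int × String)) (s : PySem.Set Int) (x : Int) :
    x ∈ l.foldl (pvSetStep word) s ↔ x ∈ s ∨ ∃ p ∈ l, p.2 = word ∧ (x = p.1 ∨ x = p.1 - 1) := by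
  induction l generalizing s with
  | nil => simp
  | cons p t ih =>
    simp only [List.foldl_cons, ih, pvSetStep]
    by_cases hp : p.2 = word
    · simp [hp, PySem.Set.mem_add]
      constructor
      · rintro (((h|h)|h)|h)
        · exact Or.inl h
        · exact Or.inr (Or.inl (Or.inl h))
        · exact Or.inr (Or.inl (Or.inr h))
        · exact Or.inr (Or.inr h)
      · rintro (h|(h|h)|h)
        · exact Or.inl (Or.inl (Or.inl h))
        · exact Or.inl (Or.inl (Or.inr h))
        · exact Or.inl (Or.inr h)
        · exact Or.inr h
    · simp [hp]

theorem pvSet_nodup (word : String) (l : List (Int × String)) (s : PySem.Set Int)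
    (h : s.Nodup) : (l.foldl (pvSetStep word) s).Nodup := by
  induction l generalizing s with
  | nil => exact h
  | cons p t ih =>
    apply ih
    unfold pvSetStep
    split
    · exact PySem.Set.nodup_add _ _ (PySem.Set.nodup_add _ _ h)
    · exact h

theorem pvLast_max (m : List Int) (x : Int) (hp : m.Pairwise (· < ·))
    (hl : m.getLast? = some x) : ∀ y ∈ m, y ≤ x := by
  induction m with
  | nil => simp at hl
  | cons a t ih =>
    rcases List.Pairwise.of_cons hp with _
    cases t with
    | nil => simp at hl; simp [hl]
    | cons b u =>
      rw [List.getLast?_cons_cons] at hl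
      intro y hy
      rcases List.mem_cons.1 hy with rfl | hyt
      · have hx : x ∈ b :: u := List.mem_of_getLast? hl
        have := (List.pairwise_cons.1 hp).1 x hx
        omega
      · exact ih (List.Pairwise.of_cons hp) hl y hyt

theorem pvMergeStep_mem (m : List Int) (i x : Int) :
    x ∈ pvMergeStep m i ↔ x ∈ m ∨ x = i - 1 ∨ x = i := by
  unfold pvMergeStep
  cases hl : m.getLast? with
  | none => simp
  | some z =>
    by_cases hz : z = i - 1
    · have hmem : (i - 1) ∈ m := hz ▸ List.mem_of_getLast? hl
      simp only [hz, beq_self_eq_true, if_true, List.mem_append, List.mem_singleton]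
      constructor
      · rintro (h|h)
        · exact Or.inl h
        · exact Or.inr (Or.inr h)
      · rintro (h|h|h)
        · exact Or.inl h
        · exact Or.inl (h ▸ hmem)
        · exact Or.inr h
    · have hzb : (z == i - 1) = false := by simp [hz]
      simp [hzb]

theorem pvMerge_mem (occ : List Int) (m : List Int) (x : Int) :
    x ∈ occ.foldl pvMergeStep m ↔ x ∈ m ∨ ∃ i ∈ occ, x = i - 1 ∨ x = i := by
  induction occ generalizing m with
  | nil => simp
  | cons i t ih =>
    rw [List.foldl_cons, ih, List.exists_mem_cons_iff, pvMergeStep_mem]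
    constructor
    · rintro ((h|h)|h)
      · exact Or.inl h
      · exact Or.inr (Or.inl h)
      · exact Or.inr (Or.inr h)
    · rintro (h|h|h)
      · exact Or.inl (Or.inl h)
      · exact Or.inl (Or.inr h)
      · exact Or.inr h

theorem pvMergeStep_none (m : List Int) (i : Int) (h : m.getLast? = none) :
    pvMergeStep m i = m ++ [i - 1, i] := by unfold pvMergeStep; rw [h]

theorem pvMergeStep_some_eq (m : List Int) (i : Int) (h : m.getLast? = some (i - 1)) :
    pvMergeStep m i = m ++ [i] := by unfold pvMergeStep; rw [h]; simp

theorem pvMergeStep_some_ne (m : List Int) (i z : Int) (h : m.getLast? = some z)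
    (hz : z ≠ i - 1) : pvMergeStep m i = m ++ [i - 1, i] := by
  unfold pvMergeStep; rw [h]; simp [hz]

theorem pvPairTwo (a b : Int) (h : a < b) : List.Pairwise (· < ·) [a, b] := by
  simp [List.pairwise_cons]
  omega

theorem pvMerge_sorted (occ : List Int) (m : List Int) (hocc : occ.Pairwise (· < ·))
    (hm : m.Pairwise (· < ·)) (hb : ∀ y ∈ m, ∀ i ∈ occ, y ≤ i - 1) :
    (occ.foldl pvMergeStep m).Pairwise (· < ·) := by
  induction occ generalizing m with
  | nil => exact hm
  | cons i t ih =>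
    have hit : ∀ j ∈ t, i < j := (List.pairwise_cons.1 hocc).1
    have htp := (List.pairwise_cons.1 hocc).2
    have hbi : ∀ y ∈ m, y ≤ i - 1 := fun y hy => hb y hy i (List.mem_cons_self)
    have hbt : ∀ y ∈ m, ∀ j ∈ t, y ≤ j - 1 := fun y hy j hj => hb y hy j (List.mem_cons_of_mem i hj)
    rw [List.foldl_cons]
    cases hl : m.getLast? with
    | none =>
      rw [pvMergeStep_none m i hl]
      refine ih (m ++ [i - 1, i]) htp ?_ ?_
      · have hm0 : m = [] := List.getLast?_eq_none_iff.1 hl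
        subst hm0
        exact pvPairTwo _ _ (by omega)
      · intro y hy j hj
        have hij := hit j hj
        rcases List.mem_append.1 hy with h | h
        · have := hbi y h; omega
        · simp at h; rcases h with rfl | rfl <;> omega
    | some z =>
      have hzm : ∀ y ∈ m, y ≤ z := pvLast_max m z hm hl
      have hzle : z ≤ i - 1 := hbi z (List.mem_of_getLast? hl)
      by_cases hz : z = i - 1
      · rw [pvMergeStep_some_eq m i (hz ▸ hl)]
        refine ih (m ++ [i]) htp ?_ ?_
        · refine List.pairwise_append.2 ⟨hm, List.pairwise_singleton _ _, ?_⟩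
          intro y hy w hw
          rcases List.mem_singleton.1 hw with rfl
          have := hbi y hy; omega
        · intro y hy j hj
          have hij := hit j hj
          rcases List.mem_append.1 hy with h | h
          · have := hbi y h; omega
          · rcases List.mem_singleton.1 h with rfl; omega
      · rw [pvMergeStep_some_ne m i z hl hz]
        refine ih (m ++ [i - 1, i]) htp ?_ ?_
        · refine List.pairwise_append.2 ⟨hm, pvPairTwo _ _ (by omega), ?_⟩
          intro y hy w hw
          have hyz := hzm y hy
          simp at hw
          rcases hw with rfl | rfl <;> omega
        · intro y hy j hj
          have hij := hit j hj
          rcases List.mem_append.1 hy with h | h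
          · have := hbi y h; omega
          · simp at h; rcases h with rfl | rfl <;> omega

theorem pvOcc_pairwise (list_tokens : List String) (word : String) :
    (pvOcc list_tokens word).Pairwise (· < ·) := by
  unfold pvOcc
  refine List.Pairwise.map _ (fun a b h => h) ?_
  exact List.Pairwise.filter _ (PySem.List.pairwise_lt_enumerate list_tokens 0)

theorem pvOcc_mem (list_tokens : List String) (word : String) (x : Int) :
    x ∈ pvOcc list_tokens word ↔
      ∃ p ∈ PySem.List.enumerate list_tokens, p.2 = word ∧ p.1 = x := by
  unfold pvOcc
  simp only [List.mem_map, List.mem_filter, beq_iff_eq]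
  constructor
  · rintro ⟨p, ⟨hp, hw⟩, rfl⟩; exact ⟨p, hp, hw, rfl⟩
  · rintro ⟨p, hp, hw, rfl⟩; exact ⟨p, ⟨hp, hw⟩, rfl⟩

theorem pvPositions_getD (list_tokens : List String) (word : String) :
    (((PySem.List.enumerate list_tokens).foldl
       (fun d p => d.modify p.2 [] (fun l => l ++ [p.1])) PySem.Dict.empty).getD word [])
    = pvOcc list_tokens word := by
  have h := PySem.Dict.getD_foldl_modify_append
    ((PySem.List.enumerate list_tokens).map (fun p => (p.2, p.1)))
    (PySem.Dict.empty : PySem.Dict String (List Int)) word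
  rw [List.foldl_map] at h
  rw [h]
  unfold pvOcc
  rw [List.filter_map, List.map_map]
  rfl


theorem pvWord_eq (list_tokens : List String) (word : String) :
    PySem.List.sorted ((PySem.List.enumerate list_tokens).foldl (pvSetStep word) PySem.Set.empty)
      (fun x => x) false
    = (pvOcc list_tokens word).foldl pvMergeStep [] := by
  set S := (PySem.List.enumerate list_tokens).foldl (pvSetStep word) PySem.Set.empty with hS
  set M := (pvOcc list_tokens word).foldl pvMergeStep [] with hM
  have hMp : M.Pairwise (· < ·) :=
    pvMerge_sorted _ [] (pvOcc_pairwise list_tokens word) (List.Pairwise.nil) (by simp)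
  have hMn : M.Nodup := hMp.imp (fun h => ne_of_lt h)
  have hSn : S.Nodup := pvSet_nodup word _ _ List.nodup_nil
  have hmem : ∀ x, x ∈ M ↔ x ∈ S := by
    intro x
    rw [hM, pvMerge_mem, hS, pvSet_mem]
    simp only [List.not_mem_nil, false_or, PySem.Set.empty]
    constructor
    · rintro ⟨i, hi, hx⟩
      rcases (pvOcc_mem list_tokens word i).1 hi with ⟨p, hp, hw, rfl⟩
      exact ⟨p, hp, hw, Or.symm hx⟩
    · rintro ⟨p, hp, hw, hx⟩
      exact ⟨p.1, (pvOcc_mem list_tokens word p.1).2 ⟨p, hp, hw, rfl⟩, Or.symm hx⟩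
  have hperm : M.Perm S := (List.perm_ext_iff_of_nodup hMn hSn).2 hmem
  exact PySem.List.sorted_eq_of_perm_of_pairwise_lt S M (fun x => x) hperm hMp

theorem pvWord_len (list_tokens : List String) (word : String) :
    (PySem.Set.len ((PySem.List.enumerate list_tokens).foldl (pvSetStep word) PySem.Set.empty) > 0)
    ↔ ¬ ((pvOcc list_tokens word).foldl pvMergeStep []).isEmpty = true := by
  have h := pvWord_eq list_tokens word
  have hl : ((pvOcc list_tokens word).foldl pvMergeStep []).length
      = ((PySem.List.enumerate list_tokens).foldl (pvSetStep word) PySem.Set.empty).length := by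
    rw [← h, PySem.List.length_sorted]
  show ((((PySem.List.enumerate list_tokens).foldl (pvSetStep word) PySem.Set.empty).length : Int) > 0) ↔ _
  rw [List.isEmpty_iff_length_eq_zero, ← hl]
  omega

-- ===== VERDICT (by name: the statement is the Claim_ definition above) =====
theorem gen_context_indexes_py_spec : Claim_equal_gen_context_indexes_py := by
  intro context_bag list_tokens _
  unfold Spec_gen_context_indexes_py gen_context_indexes_py gen_context_indexes_py_alt
  apply PySem.List.foldl_congr_mem
  intro acc word _
  simp only [pvPositions_getD]
  rw [show (fun (s : PySem.Set Int) (p : Int × String) =>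
      if p.2 == word then PySem.Set.add (PySem.Set.add s p.1) (p.1 - 1) else s)
      = pvSetStep word from rfl]
  rw [← pvWord_eq list_tokens word]
  have hlen := pvWord_len list_tokens word
  by_cases hpos : PySem.Set.len ((PySem.List.enumerate list_tokens).foldl (pvSetStep word) PySem.Set.empty) > 0
  · rw [if_pos hpos, if_neg (by rw [pvWord_eq]; exact hlen.1 hpos)]
  · rw [if_neg hpos, if_pos (by rw [pvWord_eq]; by_contra hne; exact hpos (hlen.2 hne))]
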